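-- pv_equiv track=rewrite | github.com/ed-schwarz/BEING | SpektraBsi.py | _create_param_list_string
-- ===== SOURCE A (Python) =====
-- def _create_param_list_string(value, default, card_select, create_hex=False):
--     """
--     creates pameter list for BSI (AL,HL,...) dependent on card_select
--
--     :param value: option_name for list elements to create
--     :param default:  is option_name for not selected/not existing cards
--     :param card_select: 1,2,..16 (single card) or 0 (all cards)
--     :param create_hex: True=convert to hex (for example 15->0F 1023->03FF...)
--     :return: string (for use as parameter list in bsi command)
--     """
--     str_var: str = ''
--     if card_select == 0:
--         for crd_nr in range(16):
--             if not create_hex: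
--                 str_var += str(value) + ','
--             else:
--                 str_hex = hex(value)
--                 str_hex = str_hex[2:]  # cut 0x
--                 # be sure to have equal number of nibbles
--                 if (len(str_hex) % 2) == 1:
--                     str_hex = '0' + str_hex
--                 str_var += str_hex + ','
--     else:
--         for crd_nr in range(16):
--             if crd_nr == card_select - 1:
--                 if not create_hex:
--                     str_var += str(value) + ','
--                 else:
--                     str_hex = hex(value)
--                     str_hex = str_hex[2:]  # cut 0x
--                     # be sure to have equal number of nibbles
--                     if (len(str_hex) % 2) == 1:
--                         str_hex = '0' + str_hex
--                     str_var += str_hex + ','  # format(value, '#04x')[2:]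
--             else:
--                 str_var += str(default)
--                 str_var += ','
--     str_var = str_var[:-1]
--     return str_var
-- ===== SOURCE B (Python) =====
-- def _create_param_list_string(value, default, card_select, create_hex=False):
--     # Segment arithmetic: the result is prefix + value-token + suffix built by
--     # string repetition; no loop over the 16 slots, no list, no join.
--     if create_hex:
--         h = hex(value)[2:]
--         tok = '0' + h if len(h) % 2 == 1 else h
--     else:
--         tok = str(value)
--     if card_select == 0:
--         return tok + (',' + tok) * 15
--     d = str(default)
--     if 1 <= card_select <= 16:
--         return (d + ',') * (card_select - 1) + tok + (',' + d) * (16 - card_select)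
--     return d + (',' + d) * 15
-- ===== Notes on version B (the rewrite author's own statement) =====
-- stated objective: alternative
-- what changed: B computes the result as three segments by string repetition — (default+',')*(card_select-1) + value-token + (','+default)*(16-card_select), or 16 repeated tokens when card_select is 0 or out of range — with the value formatted once, instead of A's 16-iteration loop that branches per slot, re-formats the value each pass and strips a trailing comma.
import Mathlib
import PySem

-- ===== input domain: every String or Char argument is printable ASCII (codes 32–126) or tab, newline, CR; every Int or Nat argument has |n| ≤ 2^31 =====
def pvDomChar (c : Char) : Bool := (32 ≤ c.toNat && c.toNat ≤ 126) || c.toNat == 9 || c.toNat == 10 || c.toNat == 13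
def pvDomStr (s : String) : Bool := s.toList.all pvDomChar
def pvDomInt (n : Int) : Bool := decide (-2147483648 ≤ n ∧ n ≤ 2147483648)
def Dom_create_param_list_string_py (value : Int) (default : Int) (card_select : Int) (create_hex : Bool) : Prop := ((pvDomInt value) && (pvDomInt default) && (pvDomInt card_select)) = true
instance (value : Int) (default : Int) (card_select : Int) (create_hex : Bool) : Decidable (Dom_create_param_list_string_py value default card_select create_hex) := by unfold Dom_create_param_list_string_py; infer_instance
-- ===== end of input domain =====

-- B builds the result by segment arithmetic — prefix + value token + suffix via string
-- repetition — instead of A's 16-iteration loop with a per-slot branch and a trailing-comma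
-- strip (objective: alternative).

-- hex digit character, Python-exact (lowercase a..f)
def pvHexDigit (n : Nat) : Char := if n < 10 then Char.ofNat (48 + n) else Char.ofNat (87 + n)

-- hex digits of a positive Nat, most significant first (fuel-bounded structural recursion)
def pvHexAux : Nat → Nat → List Char → List Char
  | 0, _, acc => acc
  | f + 1, n, acc => if n = 0 then acc else pvHexAux f (n / 16) (pvHexDigit (n % 16) :: acc)

def pvHexNat (n : Nat) : List Char := if n = 0 then ['0'] else pvHexAux (n + 1) n []

-- Python's hex(v): '0x…' for v ≥ 0, '-0x…' for v < 0
def pyHex (v : Int) : List Char :=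
  if v < 0 then '-' :: '0' :: 'x' :: pvHexNat v.natAbs else '0' :: 'x' :: pvHexNat v.toNat

-- the hex-format snippet both Pythons contain: hex(value)[2:], '0'-padded to an even number of chars
def pvHexEven (value : Int) : List Char :=
  let str_hex := pyHex value
  let str_hex := PySem.List.slice str_hex (some 2) none
  if str_hex.length % 2 = 1 then '0' :: str_hex else str_hex

-- Python's 's * n' on strings (as char lists)
def pyRep (s : List Char) (n : Nat) : List Char := (List.replicate n s).flatten

-- ===== PORT A =====
def create_param_list_string_py (value : Int) (default : Int) (card_select : Int) (create_hex : Bool) : String :=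
  let str_var : List Char :=
    if card_select = 0 then
      (PySem.List.pyRange 0 16 1).foldl (fun s _ =>
        if !create_hex then s ++ (PySem.Int.toChars value ++ [','])
        else s ++ (pvHexEven value ++ [','])) []
    else
      (PySem.List.pyRange 0 16 1).foldl (fun s crd_nr =>
        if crd_nr = card_select - 1 then
          if !create_hex then s ++ (PySem.Int.toChars value ++ [','])
          else s ++ (pvHexEven value ++ [','])
        else s ++ (PySem.Int.toChars default ++ [','])) []
  String.ofList (PySem.List.slice str_var none (some (-1)))

-- ===== PORT B =====
def create_param_list_string_py_alt (value : Int) (default : Int) (card_select : Int) (create_hex : Bool) : String :=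
  let tok : List Char := if create_hex then pvHexEven value else PySem.Int.toChars value
  if card_select = 0 then
    String.ofList (tok ++ pyRep (',' :: tok) 15)
  else
    let d : List Char := PySem.Int.toChars default
    if 1 ≤ card_select ∧ card_select ≤ 16 then
      String.ofList (pyRep (d ++ [',']) (card_select - 1).toNat ++ tok ++ pyRep (',' :: d) (16 - card_select).toNat)
    else
      String.ofList (d ++ pyRep (',' :: d) 15)

-- ===== PRECONDITION & SPEC =====
def Spec_create_param_list_string_py (value : Int) (default : Int) (card_select : Int) (create_hex : Bool) (out : String) : Prop := out = create_param_list_string_py_alt value default card_select create_hex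
instance (value : Int) (default : Int) (card_select : Int) (create_hex : Bool) (out : String) : Decidable (Spec_create_param_list_string_py value default card_select create_hex out) := by unfold Spec_create_param_list_string_py; infer_instance

-- ===== CLAIM (what is proved, stated in full; the proofs are below) =====
def Claim_equal_create_param_list_string_py : Prop := ∀ (value : Int) (default : Int) (card_select : Int) (create_hex : Bool), Dom_create_param_list_string_py value default card_select create_hex → Spec_create_param_list_string_py value default card_select create_hex (create_param_list_string_py value default card_select create_hex)

-- ===== LEMMAS AND PROOFS =====

-- flatMap each part followed by ',' then drop the trailing ',' = join with ','
lemma pvFlatMap_dropLast_join (parts : List (List Char)) (h : parts ≠ []) :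
    (parts.flatMap (fun p => p ++ [','])).dropLast = PySem.Chars.join [','] parts := by
  induction parts with
  | nil => exact absurd rfl h
  | cons p rest ih =>
    cases rest with
    | nil => simp [PySem.Chars.join_singleton]
    | cons q rs =>
      rw [PySem.Chars.join_cons_cons, ← ih (by simp), List.flatMap_cons,
          List.append_assoc, List.dropLast_append, List.dropLast_append]
      simp

lemma pvRange16 : PySem.List.pyRange 0 16 1 = [0,1,2,3,4,5,6,7,8,9,10,11,12,13,14,15] := by decide

-- A's loop in the card_select = 0 case: 16 copies of v ++ ',' then strip the last char
lemma pvLoop0 (v : List Char) :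
    PySem.List.slice
      ((PySem.List.pyRange 0 16 1).foldl (fun s (_ : Int) => s ++ (v ++ [','])) []) none (some (-1))
      = PySem.Chars.join [','] (List.replicate 16 v) := by
  rw [show (PySem.List.pyRange 0 16 1).foldl (fun s (_ : Int) => s ++ (v ++ [','])) []
        = List.flatMap (fun p => p ++ [',']) (List.replicate 16 v) from by
      simp [pvRange16, List.replicate, List.flatMap_cons],
    PySem.List.slice_to_neg_one, pvFlatMap_dropLast_join _ (by simp)]

-- A's loop in the card_select ≠ 0 case, abstracted over the two chunk strings
lemma pvLoopSel (v d : List Char) (cs : Int) :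
    PySem.List.slice
      ((PySem.List.pyRange 0 16 1).foldl
        (fun s c => if c = cs - 1 then s ++ (v ++ [',']) else s ++ (d ++ [','])) []) none (some (-1))
      = PySem.Chars.join [',']
          ((PySem.List.pyRange 0 16 1).map (fun c => if c = cs - 1 then v else d)) := by
  rw [show (fun (s : List Char) (c : Int) =>
        if c = cs - 1 then s ++ (v ++ [',']) else s ++ (d ++ [',']))
      = fun s c => s ++ ((if c = cs - 1 then v else d) ++ [','])
    from funext fun s => funext fun c => by by_cases hc : c = cs - 1 <;> simp [hc]]
  rw [← List.foldl_map (f := fun c => if c = cs - 1 then v else d)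
        (g := fun s p => s ++ (p ++ [','])),
      PySem.List.foldl_append_eq_flatMap, List.nil_append, PySem.List.slice_to_neg_one,
      pvFlatMap_dropLast_join _ (by simp [pvRange16])]

-- joining x followed by b copies of d = x then b copies of ','+d
lemma pvJoinConsFlat (x d : List Char) (b : Nat) :
    PySem.Chars.join [','] (x :: List.replicate b d) = x ++ pyRep (',' :: d) b := by
  induction b generalizing x with
  | zero => simp [PySem.Chars.join_singleton, pyRep]
  | succ b ih =>
    rw [List.replicate_succ, PySem.Chars.join_cons_cons, ih d]
    simp [pyRep, List.replicate_succ]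

-- joining a copies of d, then v, then b copies of d = segment arithmetic form
lemma pvJoinSeg (d v : List Char) (a b : Nat) :
    PySem.Chars.join [','] (List.replicate a d ++ v :: List.replicate b d)
      = pyRep (d ++ [',']) a ++ v ++ pyRep (',' :: d) b := by
  induction a with
  | zero => simp [pvJoinConsFlat, pyRep]
  | succ a ih =>
    rw [List.replicate_succ, List.cons_append]
    cases hL : List.replicate a d ++ v :: List.replicate b d with
    | nil => simp at hL
    | cons x xs =>
      rw [PySem.Chars.join_cons_cons, ← hL, ih]
      simp [pyRep, List.replicate_succ]

-- the per-slot selection A's loop makes, for in-range card_select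
lemma pvSelParts (v d : List Char) (cs : Int) (h1 : 1 ≤ cs) (h2 : cs ≤ 16) :
    (PySem.List.pyRange 0 16 1).map (fun c => if c = cs - 1 then v else d)
      = List.replicate (cs - 1).toNat d ++ v :: List.replicate (16 - cs).toNat d := by
  interval_cases cs <;> simp [pvRange16, List.replicate]

-- out-of-range card_select: the branch never fires
lemma pvSelPartsOut (v d : List Char) (cs : Int) (h : ¬ (1 ≤ cs ∧ cs ≤ 16)) :
    (PySem.List.pyRange 0 16 1).map (fun c => if c = cs - 1 then v else d)
      = List.replicate 16 d := by
  have hne : ∀ k : Int, 0 ≤ k → k ≤ 15 → ¬ (k = cs - 1) := by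
    intro k hk1 hk2 hk
    rcases not_and_or.mp h with h' | h' <;> omega
  simp [pvRange16, List.replicate,
    hne 0 (by norm_num) (by norm_num), hne 1 (by norm_num) (by norm_num),
    hne 2 (by norm_num) (by norm_num), hne 3 (by norm_num) (by norm_num),
    hne 4 (by norm_num) (by norm_num), hne 5 (by norm_num) (by norm_num),
    hne 6 (by norm_num) (by norm_num), hne 7 (by norm_num) (by norm_num),
    hne 8 (by norm_num) (by norm_num), hne 9 (by norm_num) (by norm_num),
    hne 10 (by norm_num) (by norm_num), hne 11 (by norm_num) (by norm_num),
    hne 12 (by norm_num) (by norm_num), hne 13 (by norm_num) (by norm_num),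
    hne 14 (by norm_num) (by norm_num), hne 15 (by norm_num) (by norm_num)]

-- A's card_select = 0 loop result, in B's repetition form
lemma pvCoreAll (v : List Char) :
    PySem.List.slice
      ((PySem.List.pyRange 0 16 1).foldl (fun s (_ : Int) => s ++ (v ++ [','])) []) none (some (-1))
      = v ++ pyRep (',' :: v) 15 := by
  rw [pvLoop0, show (16 : Nat) = 15 + 1 from rfl, List.replicate_succ, pvJoinConsFlat]

-- A's card_select ≠ 0 loop result, in B's segment form
lemma pvCoreSel (v d : List Char) (cs : Int) :
    PySem.List.slice
      ((PySem.List.pyRange 0 16 1).foldl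
        (fun s c => if c = cs - 1 then s ++ (v ++ [',']) else s ++ (d ++ [','])) []) none (some (-1))
      = if 1 ≤ cs ∧ cs ≤ 16 then
          pyRep (d ++ [',']) (cs - 1).toNat ++ v ++ pyRep (',' :: d) (16 - cs).toNat
        else d ++ pyRep (',' :: d) 15 := by
  rw [pvLoopSel]
  by_cases hin : 1 ≤ cs ∧ cs ≤ 16
  · rw [if_pos hin, pvSelParts _ _ _ hin.1 hin.2, pvJoinSeg]
  · rw [if_neg hin, pvSelPartsOut _ _ _ hin,
      show (16 : Nat) = 15 + 1 from rfl, List.replicate_succ, pvJoinConsFlat]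

theorem create_param_list_string_py_spec' (value default card_select : Int) (create_hex : Bool) :
    create_param_list_string_py value default card_select create_hex
      = create_param_list_string_py_alt value default card_select create_hex := by
  unfold create_param_list_string_py create_param_list_string_py_alt
  by_cases h0 : card_select = 0
  · simp only [h0, ite_true]
    cases create_hex <;>
      simp only [Bool.not_false, Bool.not_true, ite_true, ite_false, Bool.false_eq_true] <;>
      exact congrArg String.ofList (pvCoreAll _)
  · simp only [if_neg h0]
    cases create_hex <;>
      simp only [Bool.not_false, Bool.not_true, ite_true, ite_false, Bool.false_eq_true] <;>
      rw [pvCoreSel, apply_ite String.ofList]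

-- ===== VERDICT (by name: the statement is the Claim_ definition above) =====
theorem create_param_list_string_py_spec : Claim_equal_create_param_list_string_py := by
  intro value default card_select create_hex _
  exact create_param_list_string_py_spec' value default card_select create_hex
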